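-- pv_equiv track=rewrite | github.com/anupyadav27/threat-engine | engines/threat/threat_engine/graph/graph_queries.py | _extract_severity_from_tags
-- ===== SOURCE A (Python) =====
-- from typing import Any, Dict, List, Optional
--
-- def _extract_severity_from_tags(tags: Any) -> str:
--     """Extract severity from tags list (e.g. ['critical', 'data-exposure'] → 'critical')."""
--     if not tags:
--         return "medium"
--     if isinstance(tags, str):
--         tags = [tags]
--     for sev in ("critical", "high", "medium", "low"):
--         if sev in tags:
--             return sev
--     return "medium"
-- ===== SOURCE B (Python) =====
-- RANK = {"critical": 0, "high": 1, "medium": 2, "low": 3}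
-- LABELS = ("critical", "high", "medium", "low")
--
-- def _extract_severity_from_tags(tags):
--     """Extract severity from tags list (e.g. ['critical', 'data-exposure'] -> 'critical')."""
--     if not tags:
--         return "medium"
--     if isinstance(tags, str):
--         tags = [tags]
--     best = 4
--     for t in tags:
--         best = min(best, RANK.get(t, 4))
--     return LABELS[best] if best < 4 else "medium"
-- ===== Notes on version B (the rewrite author's own statement) =====
-- stated objective: alternative
-- what changed: B scans the tags once, keeping the minimum rank from a prebuilt rank table, instead of membership-testing the whole tags list once per severity in the fixed priority order.
import Mathlib
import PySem

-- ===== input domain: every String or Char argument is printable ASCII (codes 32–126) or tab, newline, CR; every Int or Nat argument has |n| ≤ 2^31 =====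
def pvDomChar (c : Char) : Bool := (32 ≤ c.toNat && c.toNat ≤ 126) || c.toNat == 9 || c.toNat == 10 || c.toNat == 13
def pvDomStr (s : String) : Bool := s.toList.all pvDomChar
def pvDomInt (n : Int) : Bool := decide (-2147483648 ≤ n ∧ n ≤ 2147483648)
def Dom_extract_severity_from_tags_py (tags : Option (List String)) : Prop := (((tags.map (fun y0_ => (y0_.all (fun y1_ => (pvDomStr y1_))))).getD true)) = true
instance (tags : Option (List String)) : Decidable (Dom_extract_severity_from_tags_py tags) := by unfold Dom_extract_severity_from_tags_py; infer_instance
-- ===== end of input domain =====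

-- B is a single pass keeping the minimum severity rank from a prebuilt table, instead of A's
-- membership test of the tags list for each severity in priority order (objective: alternative).
-- Under the type Option (List String) the `isinstance(tags, str)` branch of the Python never fires.

-- ===== PORT A =====
-- the `for sev in ("critical","high","medium","low"): if sev in tags: return sev` loop
def sevLoopA (ts : List String) : List String → String
  | [] => "medium"
  | sev :: rest => if ts.contains sev then sev else sevLoopA ts rest

def extract_severity_from_tags_py (tags : Option (List String)) : String :=
  match tags with
  | none => "medium"                                  -- `if not tags` (None)
  | some ts =>
    if ts = [] then "medium"                          -- `if not tags` (empty list)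
    else sevLoopA ts ["critical", "high", "medium", "low"]

-- ===== PORT B =====
def rankB : PySem.Dict String Int :=
  PySem.Dict.ofList [("critical", 0), ("high", 1), ("medium", 2), ("low", 3)]

def labelsB : List String := ["critical", "high", "medium", "low"]

def extract_severity_from_tags_py_alt (tags : Option (List String)) : String :=
  match tags with
  | none => "medium"
  | some ts =>
    if ts = [] then "medium"
    else
      let best := ts.foldl (fun b t => min b (rankB.getD t 4)) 4
      -- LABELS[best] : best is 0..3 here, so the tuple index is in range
      if best < 4 then (PySem.List.pyGet? labelsB best).getD "" else "medium"

-- ===== PRECONDITION & SPEC =====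
def Spec_extract_severity_from_tags_py (tags : Option (List String)) (out : String) : Prop := out = extract_severity_from_tags_py_alt tags
instance (tags : Option (List String)) (out : String) : Decidable (Spec_extract_severity_from_tags_py tags out) := by unfold Spec_extract_severity_from_tags_py; infer_instance

-- ===== CLAIM (what is proved, stated in full; the proofs are below) =====
def Claim_equal_extract_severity_from_tags_py : Prop := ∀ (tags : Option (List String)), Dom_extract_severity_from_tags_py tags → Spec_extract_severity_from_tags_py tags (extract_severity_from_tags_py tags)

-- ===== LEMMAS AND PROOFS =====

-- minimum rank of a list, recursively
def minRank : List String → Int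
  | [] => 4
  | t :: ts => min (rankB.getD t 4) (minRank ts)

theorem foldl_min_rank (ts : List String) (b : Int) (hb : b ≤ 4) :
    ts.foldl (fun b t => min b (rankB.getD t 4)) b = min b (minRank ts) := by
  induction ts generalizing b with
  | nil => simp [minRank]; omega
  | cons t ts ih =>
    simp only [List.foldl, minRank]
    rw [ih (min b (rankB.getD t 4)) (by omega), min_assoc]

def chainRank (ts : List String) : Int :=
  if "critical" ∈ ts then 0 else if "high" ∈ ts then 1
  else if "medium" ∈ ts then 2 else if "low" ∈ ts then 3 else 4

theorem rank_critical : rankB.getD "critical" 4 = 0 := by decide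
theorem rank_high : rankB.getD "high" 4 = 1 := by decide
theorem rank_medium : rankB.getD "medium" 4 = 2 := by decide
theorem rank_low : rankB.getD "low" 4 = 3 := by decide
theorem rankB_items : rankB.items = [("critical", (0:Int)), ("high", 1), ("medium", 2), ("low", 3)] := by decide

theorem minRank_eq_chain (ts : List String) : minRank ts = chainRank ts := by
  induction ts with
  | nil => simp [minRank, chainRank]
  | cons t ts ih =>
    by_cases h1 : t = "critical"
    · subst h1; simp [minRank, ih, chainRank, List.mem_cons, rank_critical]
      split_ifs <;> decide
    by_cases h2 : t = "high"
    · subst h2; simp [minRank, ih, chainRank, List.mem_cons, rank_high]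
      split_ifs <;> decide
    by_cases h3 : t = "medium"
    · subst h3; simp [minRank, ih, chainRank, List.mem_cons, rank_medium]
      split_ifs <;> decide
    by_cases h4 : t = "low"
    · subst h4; simp [minRank, ih, chainRank, List.mem_cons, rank_low]
      split_ifs <;> decide
    · have hr : rankB.getD t 4 = 4 := by
        have e1 : ("critical" == t) = false := beq_eq_false_iff_ne.mpr (Ne.symm h1)
        have e2 : ("high" == t) = false := beq_eq_false_iff_ne.mpr (Ne.symm h2)
        have e3 : ("medium" == t) = false := beq_eq_false_iff_ne.mpr (Ne.symm h3)
        have e4 : ("low" == t) = false := beq_eq_false_iff_ne.mpr (Ne.symm h4)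
        rw [PySem.Dict.getD_eq_get?_getD, PySem.Dict.get?, rankB_items]
        simp [List.find?, e1, e2, e3, e4]
      simp [minRank, hr, ih, chainRank, List.mem_cons, Ne.symm h1, Ne.symm h2, Ne.symm h3,
        Ne.symm h4]
      split_ifs <;> decide

-- ===== VERDICT (by name: the statement is the Claim_ definition above) =====
theorem extract_severity_from_tags_py_spec : Claim_equal_extract_severity_from_tags_py := by
  intro tags _
  unfold Spec_extract_severity_from_tags_py
  match tags with
  | none => rfl
  | some ts =>
    by_cases hts : ts = []
    · simp [extract_severity_from_tags_py, extract_severity_from_tags_py_alt, hts]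
    · simp only [extract_severity_from_tags_py, extract_severity_from_tags_py_alt, if_neg hts]
      rw [foldl_min_rank ts 4 (by omega), minRank_eq_chain,
        min_eq_right (by rw [chainRank]; split_ifs <;> decide)]
      unfold chainRank
      by_cases h1 : "critical" ∈ ts
      · simp [sevLoopA, h1]; decide
      by_cases h2 : "high" ∈ ts
      · simp [sevLoopA, h1, h2]; decide
      by_cases h3 : "medium" ∈ ts
      · simp [sevLoopA, h1, h2, h3]; decide
      by_cases h4 : "low" ∈ ts
      · simp [sevLoopA, h1, h2, h3, h4]; decide
      · simp [sevLoopA, h1, h2, h3, h4]
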